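-- pv_equiv track=rewrite | github.com/cltl/wsd-dynamic-sense-vector | scripts/wn_utils.py | generate_training_instances
-- ===== SOURCE A (Python) =====
-- import itertools
--
-- def generate_training_instances(sentence_lemmas, annotations):
--     """
--     given the lemmas in a sentence with its annotations (can be more than one)
--     generate all training instances for that sentence
--
--     e.g.
--     sentence_lemmas = ['the', 'man',            'meeting', 'woman']
--     annotations =     [[],    ['1', '2' , '3'], ['4'],     ['5', '6']]
--
--     would result in
--     the man---1 meeting---4 woman---5
--     the man---2 meeting woman---6
--     the man---3 meeting woman
--
--     :param list sentence_lemmas: see above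
--     :param list annotations: see above
--
--     :rtype: set
--     :return: set of strings (representing annotated sentences)
--     """
--     instances = set()
--     for one_annotated_sent in itertools.zip_longest(*annotations):
--         a_sentence = []
--         for index, annotation in enumerate(one_annotated_sent):
--             lemma = sentence_lemmas[index]
--             if annotation is not None:
--                 a_sentence.append(lemma + '---' + annotation)
--             else:
--                 a_sentence.append(lemma)
--
--         instances.add(' '.join(a_sentence))
--
--     return instances
-- ===== SOURCE B (Python) =====
-- def generate_training_instances(sentence_lemmas, annotations):
--     # Single row-wise pass: walk the sentence word by word, maintaining all
--     # partially-built annotated sentence variants in parallel; a word with more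
--     # senses than current variants spawns new variants whose earlier words are
--     # the plain lemmas.
--     variants = []  # token lists, one per eventual annotated sentence
--     for pos, anns in enumerate(annotations):
--         while len(variants) < len(anns):
--             variants.append(sentence_lemmas[:pos])
--         for k in range(len(variants)):
--             lemma = sentence_lemmas[pos]
--             if k < len(anns):
--                 variants[k].append(lemma + '---' + anns[k])
--             else:
--                 variants[k].append(lemma)
--     instances = set()
--     for v in variants:
--         instances.add(' '.join(v))
--     return instances
-- ===== Notes on version B (the rewrite author's own statement) =====
-- stated objective: alternative
-- what changed: Instead of transposing the annotation lists into columns with itertools.zip_longest and building each annotated sentence independently, B makes a single row-wise pass over the sentence, maintaining all partially-built sentence variants in parallel and spawning a new variant (prefixed with the plain lemmas seen so far) whenever a word has more senses than current variants.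
import Mathlib
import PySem

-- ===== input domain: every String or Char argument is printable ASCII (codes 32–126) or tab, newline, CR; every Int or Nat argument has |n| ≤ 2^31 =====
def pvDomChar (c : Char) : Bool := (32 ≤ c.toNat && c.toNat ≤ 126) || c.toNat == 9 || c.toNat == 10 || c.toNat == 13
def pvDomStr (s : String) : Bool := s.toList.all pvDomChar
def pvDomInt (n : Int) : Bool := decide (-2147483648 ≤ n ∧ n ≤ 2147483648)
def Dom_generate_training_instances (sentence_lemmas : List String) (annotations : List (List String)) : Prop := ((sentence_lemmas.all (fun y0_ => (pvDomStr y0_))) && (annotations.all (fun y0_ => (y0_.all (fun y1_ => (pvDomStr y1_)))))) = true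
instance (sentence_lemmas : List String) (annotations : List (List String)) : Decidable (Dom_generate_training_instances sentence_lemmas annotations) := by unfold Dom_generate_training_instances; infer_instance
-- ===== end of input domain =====

-- B replaces A's zip_longest column transpose by a single row-wise pass over the sentence that
-- grows all partial annotated variants in parallel (alternative decomposition, same cost).

-- ===== PORT A =====
-- itertools.zip_longest(*annotations): emit columns of head?s until every list is exhausted
def pvZipLongest (ls : List (List String)) : List (List (Option String)) :=
  if ls.all (·.isEmpty) then []
  else (ls.map (·.head?)) :: pvZipLongest (ls.map (·.tail))
termination_by (ls.map List.length).sum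
decreasing_by
  rename_i h
  simp only [List.all_eq_true, List.isEmpty_iff] at h
  push Not at h
  obtain ⟨a, ha, hne⟩ := h
  simp only [List.map_map]
  have : ∀ (xs : List (List String)), (∃ a ∈ xs, a ≠ []) →
      (xs.map (fun l => l.tail.length)).sum < (xs.map List.length).sum := by
    intro xs hx
    induction xs with
    | nil => simp at hx
    | cons y ys ih =>
      rcases hx with ⟨a, ha, hne⟩
      rcases List.mem_cons.mp ha with rfl | hmem
      · have : a.tail.length < a.length := by
          cases a with | nil => exact absurd rfl hne | cons _ _ => simp
        have h2 : (ys.map (fun l => l.tail.length)).sum ≤ (ys.map List.length).sum := by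
          apply List.sum_le_sum
          intro l _
          simp
        simpa using Nat.add_lt_add_of_lt_of_le this h2
      · have h1 : y.tail.length ≤ y.length := by simp
        have h2 := ih ⟨a, hmem, hne⟩
        simpa using Nat.add_lt_add_of_le_of_lt h1 h2
  simpa [Function.comp] using this ls ⟨a, ha, hne⟩

def generate_training_instances (sentence_lemmas : List String) (annotations : List (List String)) : List String :=
  (pvZipLongest annotations).foldl (fun instances one_annotated_sent =>
    let a_sentence := (PySem.List.enumerate one_annotated_sent).foldl (fun acc p =>
      -- sentence_lemmas[index]: IndexError when out of range; Pre_ excludes those inputs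
      let lemma_ := PySem.List.pyGetD sentence_lemmas p.1 ""
      match p.2 with
      | some annotation => acc ++ [lemma_ ++ "---" ++ annotation]
      | none => acc ++ [lemma_]) []
    PySem.Set.add instances (PySem.Str.join " " a_sentence)) PySem.Set.empty

-- ===== PORT B =====
-- one row of B's loop body: spawn missing variants (prefix of plain lemmas = sentence_lemmas[:pos],
-- exact as List.take since pos ≥ 0), then extend every variant with this word's token
def pvExtendRow (sentence_lemmas : List String) (pos : Nat) (anns : List String)
    (variants : List (List String)) : List (List String) :=
  let variants := variants ++ List.replicate (anns.length - variants.length) (sentence_lemmas.take pos)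
  (List.range variants.length).map (fun k =>
    -- sentence_lemmas[pos]: IndexError when out of range; Pre_ excludes those inputs
    let lemma_ := PySem.List.pyGetD sentence_lemmas (pos : Int) ""
    variants.getD k [] ++ [if k < anns.length then lemma_ ++ "---" ++ anns.getD k "" else lemma_])

-- the 'for pos, anns in enumerate(annotations)' loop as structural recursion with the pos counter
def pvBuildVariants (sentence_lemmas : List String) : Nat → List (List String) →
    List (List String) → List (List String)
  | _, [], variants => variants
  | pos, anns :: rest, variants =>
      pvBuildVariants sentence_lemmas (pos + 1) rest (pvExtendRow sentence_lemmas pos anns variants)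

def generate_training_instances_alt (sentence_lemmas : List String) (annotations : List (List String)) : List String :=
  let variants := pvBuildVariants sentence_lemmas 0 annotations []
  variants.foldl (fun instances v => PySem.Set.add instances (PySem.Str.join " " v)) PySem.Set.empty

-- ===== PRECONDITION & SPEC =====
-- Pre_ excludes exactly the inputs where both programs raise IndexError: some annotation list is
-- nonempty (so at least one variant/column is produced) while sentence_lemmas is shorter than annotations.
def Pre_generate_training_instances (sentence_lemmas : List String) (annotations : List (List String)) : Prop :=
  (annotations.any (fun a => !a.isEmpty)) = true → annotations.length ≤ sentence_lemmas.length
instance (sentence_lemmas : List String) (annotations : List (List String)) : Decidable (Pre_generate_training_instances sentence_lemmas annotations) := by unfold Pre_generate_training_instances; infer_instance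

def pvWitness_generate_training_instances : List String × List (List String) :=
  (["the", "man"], [[], ["1", "2"]])

def Spec_generate_training_instances (sentence_lemmas : List String) (annotations : List (List String)) (out : List String) : Prop := out = generate_training_instances_alt sentence_lemmas annotations
instance (sentence_lemmas : List String) (annotations : List (List String)) (out : List String) : Decidable (Spec_generate_training_instances sentence_lemmas annotations out) := by unfold Spec_generate_training_instances; infer_instance

-- ===== CLAIM (what is proved, stated in full; the proofs are below) =====
def Claim_equal_generate_training_instances : Prop := ∀ (sentence_lemmas : List String) (annotations : List (List String)), Dom_generate_training_instances sentence_lemmas annotations → Pre_generate_training_instances sentence_lemmas annotations → Spec_generate_training_instances sentence_lemmas annotations (generate_training_instances sentence_lemmas annotations)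

-- ===== LEMMAS AND PROOFS =====

-- max annotation length (number of columns / final number of variants)
def pvMx (ls : List (List String)) : Nat := ls.foldr (fun a m => max a.length m) 0

-- the token for word i in column j
def pvTok (lem : List String) (i : Nat) (anns : List String) (j : Nat) : String :=
  if j < anns.length then PySem.List.pyGetD lem (i : Int) "" ++ "---" ++ anns.getD j ""
  else PySem.List.pyGetD lem (i : Int) ""

theorem pvMx_cons (a : List String) (as : List (List String)) :
    pvMx (a :: as) = max a.length (pvMx as) := rfl

theorem pvMx_zero (ls : List (List String)) :
    pvMx ls = 0 ↔ ls.all (·.isEmpty) = true := by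
  induction ls with
  | nil => simp [pvMx]
  | cons a as ih =>
    rw [pvMx_cons, Nat.max_eq_zero_iff, ih]
    simp [List.isEmpty_iff, ← List.length_eq_zero_iff]

theorem pvMx_tail (ls : List (List String)) :
    pvMx (ls.map (·.tail)) = pvMx ls - 1 := by
  induction ls with
  | nil => simp [pvMx]
  | cons a as ih =>
    simp only [List.map_cons, pvMx_cons, ih, List.length_tail]
    omega

theorem pv_zipLongest_eq (ls : List (List String)) :
    pvZipLongest ls = (List.range (pvMx ls)).map (fun j => ls.map (fun a => a[j]?)) := by
  generalize hM : pvMx ls = M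
  induction M generalizing ls with
  | zero =>
    rw [pvZipLongest, if_pos ((pvMx_zero ls).mp hM)]
    rfl
  | succ n ih =>
    have hne : ¬ ls.all (·.isEmpty) = true := by
      intro h
      rw [(pvMx_zero ls).mpr h] at hM
      omega
    rw [pvZipLongest, if_neg hne]
    have htail : pvMx (ls.map (·.tail)) = n := by simp [pvMx_tail, hM]
    rw [ih _ htail]
    rw [List.range_succ_eq_map]
    simp only [List.map_cons, List.map_map]
    congr 1
    · exact List.map_congr_left (fun a _ => by simp [List.head?_eq_getElem?])
    · apply List.map_congr_left
      intro j _
      simp only [Function.comp]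
      exact List.map_congr_left (fun a _ => by simp [List.getElem?_tail])

theorem pvExtendRow_length (lem : List String) (pos : Nat) (anns : List String)
    (variants : List (List String)) :
    (pvExtendRow lem pos anns variants).length = max variants.length anns.length := by
  simp [pvExtendRow]
  omega

-- the loop invariant of B's row-wise pass
theorem pvBuildVariants_spec (lem : List String) (rest : List (List String)) :
    ∀ (pos : Nat) (variants : List (List String)), pos + rest.length ≤ lem.length →
    pvBuildVariants lem pos rest variants =
      (List.range (max variants.length (pvMx rest))).map
        (fun j => (if j < variants.length then variants.getD j [] else lem.take pos) ++
          (List.range rest.length).map (fun s => pvTok lem (pos + s) (rest.getD s []) j)) := by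
  induction rest with
  | nil =>
    intro pos variants _
    simp only [pvBuildVariants, pvMx, List.foldr_nil, Nat.max_zero, List.length_nil,
      List.range_zero, List.map_nil, List.append_nil]
    apply List.ext_getElem
    · simp
    · intro j h1 h2
      simp only [List.getElem_map, List.getElem_range] at *
      have hj : j < variants.length := by simpa using h1
      simp [hj, List.getD_eq_getElem?_getD]
  | cons anns rest ih =>
    intro pos variants h
    have hpos : pos < lem.length := by simp at h; omega
    rw [pvBuildVariants, ih (pos + 1) _ (by simp at h ⊢; omega)]
    apply List.ext_getElem
    · simp [pvExtendRow_length, pvMx_cons]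
    · intro j h1 h2
      have hjlt := h1
      simp only [List.length_map, List.length_range, pvExtendRow_length] at hjlt
      simp only [List.getElem_map, List.getElem_range, List.length_cons]
      have hsplit : (List.range (rest.length + 1)).map
            (fun s => pvTok lem (pos + s) ((anns :: rest).getD s []) j)
          = pvTok lem pos anns j ::
            (List.range rest.length).map (fun s => pvTok lem (pos + 1 + s) (rest.getD s []) j) := by
        rw [List.range_succ_eq_map]
        simp only [List.map_cons, List.map_map]
        congr 1
        apply List.map_congr_left
        intro s _
        simp only [Function.comp, List.getD_cons_succ]
        have hps : pos + (s + 1) = pos + 1 + s := by omega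
        rw [hps]
      rw [hsplit]
      have hcell : (if j < (pvExtendRow lem pos anns variants).length
            then (pvExtendRow lem pos anns variants).getD j []
            else lem.take (pos + 1))
          = (if j < variants.length then variants.getD j [] else lem.take pos)
              ++ [pvTok lem pos anns j] := by
        by_cases hj : j < (pvExtendRow lem pos anns variants).length
        · have hj' : j < variants.length + (anns.length - variants.length) := by
            have hx := hj
            rw [pvExtendRow_length] at hx
            omega
          rw [if_pos hj]
          simp only [pvExtendRow, List.getD_eq_getElem?_getD, List.length_append,
            List.length_replicate]
          rw [List.getElem?_map, List.getElem?_range (by simpa using hj')]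
          simp only [Option.map_some, Option.getD_some]
          congr 1
          by_cases hv : j < variants.length
          · rw [if_pos hv, List.getElem?_append_left hv]
          · rw [if_neg hv, List.getElem?_append_right (by omega)]
            simp [(by omega : j - variants.length < anns.length - variants.length)]
        · have hj2 := hj
          rw [pvExtendRow_length] at hj2
          have hja : ¬ j < anns.length := by omega
          have hjv : ¬ j < variants.length := by omega
          rw [if_neg hj, if_neg hjv, List.take_add_one, List.getElem?_eq_getElem hpos]
          simp only [Option.toList_some]
          congr 1
          simp [pvTok, hja, List.getD_eq_getElem?_getD, List.getElem?_eq_getElem hpos]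
      rw [hcell]
      simp

-- if every annotation list is empty, B's pass never spawns a variant
theorem pvBuildVariants_all_empty (lem : List String) (rows : List (List String)) :
    ∀ pos, rows.all (·.isEmpty) = true → pvBuildVariants lem pos rows [] = [] := by
  induction rows with
  | nil => intro pos _; rfl
  | cons a as ih =>
    intro pos h
    simp only [List.all_cons, Bool.and_eq_true, List.isEmpty_iff] at h
    rw [pvBuildVariants]
    have : pvExtendRow lem pos a [] = [] := by
      simp [pvExtendRow, h.1]
    rw [this]
    exact ih (pos + 1) (by simpa using h.2)

-- A's per-column inner loop produces exactly B's tokens for that column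
theorem pv_column_eq (lem : List String) (ls : List (List String)) (j : Nat) :
    ((PySem.List.enumerate (ls.map (fun a => a[j]?))).foldl (fun acc p =>
        let lemma_ := PySem.List.pyGetD lem p.1 ""
        match p.2 with
        | some annotation => acc ++ [lemma_ ++ "---" ++ annotation]
        | none => acc ++ [lemma_]) [])
      = (List.range ls.length).map (fun s => pvTok lem (0 + s) (ls.getD s []) j) := by
  have hA : (PySem.List.enumerate (ls.map (fun a => a[j]?))).foldl (fun acc p =>
        let lemma_ := PySem.List.pyGetD lem p.1 ""
        match p.2 with
        | some annotation => acc ++ [lemma_ ++ "---" ++ annotation]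
        | none => acc ++ [lemma_]) []
      = (PySem.List.enumerate (ls.map (fun a => a[j]?))).map (fun p =>
          match p.2 with
          | some annotation => PySem.List.pyGetD lem p.1 "" ++ "---" ++ annotation
          | none => PySem.List.pyGetD lem p.1 "") := by
    have step := PySem.List.foldl_congr_mem
      (f := fun acc p =>
        let lemma_ := PySem.List.pyGetD lem p.1 ""
        match p.2 with
        | some annotation => acc ++ [lemma_ ++ "---" ++ annotation]
        | none => acc ++ [lemma_])
      (g := fun acc (p : Int × Option String) =>
        acc ++ [match p.2 with
          | some annotation => PySem.List.pyGetD lem p.1 "" ++ "---" ++ annotation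
          | none => PySem.List.pyGetD lem p.1 ""])
      (l := PySem.List.enumerate (ls.map (fun a => a[j]?))) (init := [])
      (fun acc p _ => by obtain ⟨i, o⟩ := p; cases o <;> rfl)
    rw [step, PySem.List.foldl_append_singleton_eq_map]
    simp
  rw [hA]
  apply List.ext_getElem
  · simp [PySem.List.length_enumerate]
  · intro s h1 h2
    simp only [List.getElem_map, PySem.List.getElem_enumerate, List.getElem_range]
    have hs : s < ls.length := by simpa [PySem.List.length_enumerate] using h2
    simp only [pvTok, List.getD_eq_getElem?_getD, List.getElem?_eq_getElem hs,
      Option.getD_some, Int.zero_add, Nat.zero_add]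
    by_cases hj : j < ls[s].length
    · simp [hj]
    · simp [hj]

-- ===== VERDICT (by name: the statement is the Claim_ definition above) =====
theorem generate_training_instances_spec : Claim_equal_generate_training_instances := by
  intro lem annotations _ hpre
  unfold Spec_generate_training_instances generate_training_instances generate_training_instances_alt
  by_cases hany : (annotations.any (fun a => !a.isEmpty)) = true
  · -- at least one annotated word: Pre_ gives the length bound the invariant needs
    have hlen : annotations.length ≤ lem.length := hpre hany
    rw [pvBuildVariants_spec lem annotations 0 [] (by simpa using hlen)]
    rw [pv_zipLongest_eq]
    simp only [List.length_nil, Nat.max_eq_right (Nat.zero_le _), List.take_zero,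
      Nat.not_lt_zero, if_false, List.nil_append]
    rw [List.foldl_map, List.foldl_map]
    apply PySem.List.foldl_congr_mem
    intro acc j _
    rw [pv_column_eq lem annotations j]
  · -- no word is annotated: both programs produce the empty set
    have hall : annotations.all (·.isEmpty) = true := by
      rw [Bool.not_eq_true, List.any_eq_false] at hany
      rw [List.all_eq_true]
      intro a ha
      simpa using hany a ha
    rw [pvBuildVariants_all_empty lem annotations 0 hall]
    rw [pvZipLongest, if_pos hall]
    rfl
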